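-- pv_equiv track=rewrite | github.com/DivyaNancheri/DS-algo | InterviewBit/Counting Triangles.py | nTriang
-- ===== SOURCE A (Python) =====
-- def nTriang(a):
--     m=1000000007
--     count=0
--     n=len(a)
--     a.sort()
--     for i in range(n - 1, 0, -1):
--         p1 = 0
--         p2 = i - 1;
--         while(p1 < p2):
--             if(a[p1]+a[p2]>a[i]):
--                 count+=(p2-p1)%m
--                 p2-=1
--             else:
--                 p1+=1
--     return int(count%1000000007)
-- ===== SOURCE B (Python) =====
-- def nTriang(a):
--     # Same return value; also sorts `a` in place like the original.
--     a.sort()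
--     n = len(a)
--     total = 0
--     for k in range(2, n):
--         for j in range(1, k):
--             for i in range(j):
--                 if a[i] + a[j] > a[k]:
--                     total += 1
--     return total % 1000000007
-- ===== Notes on version B (the rewrite author's own statement) =====
-- stated objective: simpler
-- what changed: Replaces the per-apex two-pointer squeeze (and its incremental count += p2-p1 with an intermediate mod) with a plain brute-force triple loop over sorted indices i<j<k counting a[i]+a[j]>a[k], taking the modulus once at the end.
import Mathlib
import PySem

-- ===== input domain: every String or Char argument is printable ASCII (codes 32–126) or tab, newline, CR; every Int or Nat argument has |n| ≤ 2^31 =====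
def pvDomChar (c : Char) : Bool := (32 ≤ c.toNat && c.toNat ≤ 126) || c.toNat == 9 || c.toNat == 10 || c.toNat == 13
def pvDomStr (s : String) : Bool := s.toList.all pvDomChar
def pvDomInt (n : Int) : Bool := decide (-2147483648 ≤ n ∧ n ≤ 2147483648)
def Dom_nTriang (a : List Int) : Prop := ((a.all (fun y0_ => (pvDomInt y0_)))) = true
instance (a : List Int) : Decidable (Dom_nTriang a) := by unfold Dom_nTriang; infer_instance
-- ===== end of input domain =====

-- B replaces the two-pointer squeeze by a plain brute-force triple loop over sorted indices (simpler, not faster).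
-- Both the Python A and the Python B sort `a` in place; the equivalence proved here is about the return value.

-- shared indexing helper: a[i]; exact here because every index used by either port is in range
def pvIdx (s : List Int) (i : Int) : Int := PySem.List.pyGetD s i 0

-- ===== PORT A =====
def nTriangLoop (s : List Int) (i : Int) (p1 p2 count : Int) : Int :=
  if p1 < p2 then
    if pvIdx s p1 + pvIdx s p2 > pvIdx s i then
      nTriangLoop s i p1 (p2 - 1) (count + PySem.Int.mod (p2 - p1) 1000000007)
    else
      nTriangLoop s i (p1 + 1) p2 count
  else count
termination_by (p2 - p1).toNat
decreasing_by all_goals omega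

def nTriang (a : List Int) : Int :=
  let count : Int := 0
  let n : Int := PySem.List.len a
  let s : List Int := PySem.List.sorted a (fun x => x) false
  let count := (PySem.List.pyRange (n - 1) 0 (-1)).foldl
      (fun count i => nTriangLoop s i 0 (i - 1) count) count
  PySem.Int.mod count 1000000007

-- ===== PORT B =====
def nTriang_alt (a : List Int) : Int :=
  let s : List Int := PySem.List.sorted a (fun x => x) false
  let n : Int := PySem.List.len a
  let total : Int := (PySem.List.pyRange 2 n 1).foldl (fun total k =>
    (PySem.List.pyRange 1 k 1).foldl (fun total j =>
      (PySem.List.pyRange 0 j 1).foldl (fun total i =>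
        if pvIdx s i + pvIdx s j > pvIdx s k then total + 1 else total) total) total) 0
  PySem.Int.mod total 1000000007

-- ===== PRECONDITION & SPEC =====
def Spec_nTriang (a : List Int) (out : Int) : Prop := out = nTriang_alt a
instance (a : List Int) (out : Int) : Decidable (Spec_nTriang a out) := by unfold Spec_nTriang; infer_instance

-- ===== CLAIM (what is proved, stated in full; the proofs are below) =====
def Claim_equal_nTriang : Prop := ∀ (a : List Int), Dom_nTriang a → Spec_nTriang a (nTriang a)

-- ===== LEMMAS AND PROOFS =====

-- pairs (x, y) with lo ≤ x < y < hi and s[x] + s[y] > t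
def pvCnt (s : List Int) (t : Int) (lo hi : ℕ) : ℕ :=
  ∑ y ∈ Finset.Ico lo hi,
    ((Finset.Ico lo y).filter (fun x : ℕ => t < pvIdx s ↑x + pvIdx s ↑y)).card

lemma pvCnt_single (s : List Int) (t : Int) (lo : ℕ) : pvCnt s t lo (lo + 1) = 0 := by
  simp [pvCnt]

lemma pvCnt_top (s : List Int) (t : Int) (lo p2 : ℕ) (h : lo ≤ p2) :
    pvCnt s t lo (p2 + 1)
      = pvCnt s t lo p2 + ((Finset.Ico lo p2).filter (fun x : ℕ => t < pvIdx s ↑x + pvIdx s ↑p2)).card := by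
  unfold pvCnt
  rw [Finset.sum_Ico_succ_top h]

lemma pvCnt_yes (s : List Int) (t : Int) (lo p2 : ℕ) (hlt : lo < p2) (hlen : p2 < s.length)
    (hmono : ∀ p q : ℕ, p ≤ q → q < s.length → pvIdx s ↑p ≤ pvIdx s ↑q)
    (hy : t < pvIdx s ↑lo + pvIdx s ↑p2) :
    pvCnt s t lo (p2 + 1) = pvCnt s t lo p2 + (p2 - lo) := by
  rw [pvCnt_top s t lo p2 (le_of_lt hlt)]
  congr 1
  rw [Finset.filter_true_of_mem, Nat.card_Ico]
  intro x hx
  rw [Finset.mem_Ico] at hx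
  have := hmono lo x hx.1 (by omega)
  omega

lemma pvCnt_no (s : List Int) (t : Int) (lo p2 : ℕ) (hlt : lo < p2) (hlen : p2 < s.length)
    (hmono : ∀ p q : ℕ, p ≤ q → q < s.length → pvIdx s ↑p ≤ pvIdx s ↑q)
    (hn : pvIdx s ↑lo + pvIdx s ↑p2 ≤ t) :
    pvCnt s t lo (p2 + 1) = pvCnt s t (lo + 1) (p2 + 1) := by
  unfold pvCnt
  rw [Finset.sum_eq_sum_Ico_succ_bot (by omega : lo < p2 + 1)]
  simp only [Finset.Ico_self, Finset.filter_empty, Finset.card_empty, zero_add]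
  refine Finset.sum_congr rfl ?_
  intro y hy
  rw [Finset.mem_Ico] at hy
  congr 1
  apply Finset.ext
  intro x
  simp only [Finset.mem_filter, Finset.mem_Ico]
  constructor
  · rintro ⟨⟨h1, h2⟩, h3⟩
    refine ⟨⟨?_, h2⟩, h3⟩
    rcases Nat.lt_or_ge lo x with h | h
    · omega
    · -- x = lo: contradiction with hn via monotonicity s[y] ≤ s[p2]
      have hx : x = lo := by omega
      have hm := hmono y p2 (by omega) hlen
      subst hx
      omega
  · rintro ⟨⟨h1, h2⟩, h3⟩
    exact ⟨⟨by omega, h2⟩, h3⟩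

-- the two-pointer loop computes pvCnt, modulo 1000000007
lemma loop_mod (s : List Int) (i : Int)
    (hmono : ∀ p q : ℕ, p ≤ q → q < s.length → pvIdx s ↑p ≤ pvIdx s ↑q) :
    ∀ (d p1 p2 : ℕ), p2 - p1 = d → p1 ≤ p2 → p2 < s.length → ∀ count : Int,
      nTriangLoop s i ↑p1 ↑p2 count % 1000000007
        = (count + (pvCnt s (pvIdx s i) p1 (p2 + 1) : Int)) % 1000000007 := by
  intro d
  induction d with
  | zero =>
    intro p1 p2 hd hle hlen count
    have : p1 = p2 := by omega
    subst this
    rw [nTriangLoop]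
    simp [pvCnt_single]
  | succ e ih =>
    intro p1 p2 hd hle hlen count
    have hlt : p1 < p2 := by omega
    rw [nTriangLoop]
    rw [if_pos (by exact_mod_cast hlt)]
    by_cases hcond : pvIdx s ↑p1 + pvIdx s ↑p2 > pvIdx s i
    · rw [if_pos hcond]
      have hc1 : (↑p2 - 1 : Int) = ((p2 - 1 : ℕ) : Int) := by omega
      rw [hc1, ih p1 (p2 - 1) (by omega) (by omega) (by omega)]
      have hc2 : pvCnt s (pvIdx s i) p1 (p2 + 1) = pvCnt s (pvIdx s i) p1 p2 + (p2 - p1) :=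
        pvCnt_yes s (pvIdx s i) p1 p2 hlt hlen hmono hcond
      have hc3 : (p2 - 1 : ℕ) + 1 = p2 := by omega
      rw [hc3, hc2]
      rw [PySem.Int.mod_eq_emod_of_pos (by norm_num)]
      push_cast
      omega
    · rw [if_neg hcond]
      have hc1 : (↑p1 + 1 : Int) = ((p1 + 1 : ℕ) : Int) := by omega
      rw [hc1, ih (p1 + 1) p2 (by omega) (by omega) hlen]
      have hc2 : pvCnt s (pvIdx s i) p1 (p2 + 1) = pvCnt s (pvIdx s i) (p1 + 1) (p2 + 1) :=
        pvCnt_no s (pvIdx s i) p1 p2 hlt hlen hmono (by omega)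
      rw [hc2]

-- loop result shifts with the accumulator
lemma loop_shift (s : List Int) (i : Int) :
    ∀ (d p1 p2 : ℕ), p2 - p1 = d → ∀ count : Int,
      nTriangLoop s i ↑p1 ↑p2 count = count + nTriangLoop s i ↑p1 ↑p2 0 := by
  intro d
  induction d with
  | zero =>
    intro p1 p2 hd count
    have hn : ¬ ((↑p1 : Int) < ↑p2) := by exact_mod_cast (by omega : ¬ (p1 < p2))
    rw [nTriangLoop, if_neg hn]
    conv_rhs => rw [nTriangLoop, if_neg hn]
    ring
  | succ e ih =>
    intro p1 p2 hd count
    have hlt : p1 < p2 := by omega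
    have hl : (↑p1 : Int) < ↑p2 := by exact_mod_cast hlt
    have hc1 : (↑p2 - 1 : Int) = ((p2 - 1 : ℕ) : Int) := by omega
    have hc2 : (↑p1 + 1 : Int) = ((p1 + 1 : ℕ) : Int) := by omega
    by_cases hcond : pvIdx s ↑p1 + pvIdx s ↑p2 > pvIdx s i
    · rw [nTriangLoop, if_pos hl, if_pos hcond, hc1]
      conv_rhs => rw [nTriangLoop, if_pos hl, if_pos hcond, hc1]
      rw [ih p1 (p2 - 1) (by omega) (count + PySem.Int.mod (↑p2 - ↑p1) 1000000007),
          ih p1 (p2 - 1) (by omega) (0 + PySem.Int.mod (↑p2 - ↑p1) 1000000007)]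
      ring
    · rw [nTriangLoop, if_pos hl, if_neg hcond, hc2]
      conv_rhs => rw [nTriangLoop, if_pos hl, if_neg hcond, hc2]
      rw [ih (p1 + 1) p2 (by omega) count]

-- sums of pointwise mod-equal maps are mod-equal
lemma sum_mod_congr {α : Type} (M : Int) (L : List α) (f g : α → Int)
    (h : ∀ x ∈ L, f x % M = g x % M) :
    (L.map f).sum % M = (L.map g).sum % M := by
  induction L with
  | nil => rfl
  | cons x xs ih =>
    simp only [List.map_cons, List.sum_cons]
    rw [Int.add_emod, h x (by simp), ih (fun y hy => h y (by simp [hy])), ← Int.add_emod]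

-- bridge: countP over a pyRange is a filtered-Ico card
lemma countP_pyRange (lo hi : ℕ) (p : Int → Prop) [DecidablePred p] :
    (PySem.List.pyRange ↑lo ↑hi 1).countP (fun x => decide (p x))
      = ((Finset.Ico lo hi).filter (fun x : ℕ => p ↑x)).card := by
  induction hi with
  | zero =>
    rw [PySem.List.pyRange_one_eq_nil (by exact_mod_cast Nat.zero_le lo)]
    simp
  | succ h ih =>
    by_cases hle : lo ≤ h
    · have hc : ((h + 1 : ℕ) : Int) = (h : Int) + 1 := by push_cast; ring
      rw [hc, PySem.List.pyRange_one_succ_right (by exact_mod_cast hle),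
          List.countP_append, ih, Finset.card_filter, Finset.card_filter,
          Finset.sum_Ico_succ_top hle]
      simp [List.countP_cons]
    · rw [PySem.List.pyRange_one_eq_nil (by exact_mod_cast (by omega : h + 1 ≤ lo)),
          Finset.Ico_eq_empty (by omega)]
      simp

-- bridge: a map-sum over a pyRange is a Finset.Ico sum
lemma sum_pyRange (lo hi : ℕ) (f : Int → Int) :
    ((PySem.List.pyRange ↑lo ↑hi 1).map f).sum = ∑ y ∈ Finset.Ico lo hi, f ↑y := by
  induction hi with
  | zero =>
    rw [PySem.List.pyRange_one_eq_nil (by exact_mod_cast Nat.zero_le lo)]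
    simp
  | succ h ih =>
    by_cases hle : lo ≤ h
    · have hc : ((h + 1 : ℕ) : Int) = (h : Int) + 1 := by push_cast; ring
      rw [hc, PySem.List.pyRange_one_succ_right (by exact_mod_cast hle),
          List.map_append, List.sum_append, ih, Finset.sum_Ico_succ_top hle]
      simp
    · rw [PySem.List.pyRange_one_eq_nil (by exact_mod_cast (by omega : h + 1 ≤ lo)),
          Finset.Ico_eq_empty (by omega)]
      simp

-- abbreviations for the two per-apex summands
def pvG (s : List Int) (i : Int) : Int := nTriangLoop s i 0 (i - 1) 0

def pvS (s : List Int) (k : Int) : Int :=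
  ((PySem.List.pyRange 1 k 1).map (fun j =>
    ((PySem.List.pyRange 0 j 1).countP
      (fun i => decide (pvIdx s i + pvIdx s j > pvIdx s k)) : Int))).sum

lemma nTriang_eq_sum (a : List Int) :
    nTriang a = PySem.Int.mod
      (((PySem.List.pyRange 1 (PySem.List.len a) 1).map
        (pvG (PySem.List.sorted a (fun x => x) false))).sum) 1000000007 := by
  unfold nTriang
  simp only []
  rw [PySem.List.pyRange_neg_one_eq_reverse]
  have h1 : (PySem.List.len a - 1 + 1 : Int) = PySem.List.len a := by ring
  rw [h1]
  rw [PySem.List.foldl_congr_mem _ _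
    (fun c i => c + pvG (PySem.List.sorted a (fun x => x) false) i) _ ?_]
  · rw [PySem.List.foldl_add, List.map_reverse, List.sum_reverse, zero_add]
    norm_num
  · intro acc i hi
    rw [List.mem_reverse, PySem.List.mem_pyRange_one] at hi
    have h2 : (↑((i - 1).toNat) : Int) = i - 1 := by omega
    have hls := loop_shift (PySem.List.sorted a (fun x => x) false) i
      ((i - 1).toNat - 0) 0 ((i - 1).toNat) rfl acc
    rw [Nat.cast_zero, h2] at hls
    exact hls

lemma nTriang_alt_eq_sum (a : List Int) :
    nTriang_alt a = PySem.Int.mod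
      (((PySem.List.pyRange 2 (PySem.List.len a) 1).map
        (pvS (PySem.List.sorted a (fun x => x) false))).sum) 1000000007 := by
  unfold nTriang_alt
  simp only []
  rw [PySem.List.foldl_congr_mem _ _
    (fun t k => t + pvS (PySem.List.sorted a (fun x => x) false) k) _ ?_]
  · rw [PySem.List.foldl_add, zero_add]
  · intro t k _
    rw [PySem.List.foldl_congr_mem _ _
      (fun t j => t + ((PySem.List.pyRange 0 j 1).countP
        (fun i => decide (pvIdx (PySem.List.sorted a (fun x => x) false) i
          + pvIdx (PySem.List.sorted a (fun x => x) false) j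
          > pvIdx (PySem.List.sorted a (fun x => x) false) k)) : Int)) _ ?_]
    · rw [PySem.List.foldl_add]
      rfl
    · intro t' j _
      rw [PySem.List.foldl_ite_add_one]

lemma g_mod_eq_s_mod (a : List Int) (k : Int) (h2 : 2 ≤ k)
    (hkn : k < (a.length : Int)) :
    pvG (PySem.List.sorted a (fun x => x) false) k % 1000000007
      = pvS (PySem.List.sorted a (fun x => x) false) k % 1000000007 := by
  set s : List Int := PySem.List.sorted a (fun x => x) false with hs
  have hlen : s.length = a.length := PySem.List.length_sorted a _ false
  have hmono : ∀ p q : ℕ, p ≤ q → q < s.length → pvIdx s ↑p ≤ pvIdx s ↑q := by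
    intro p q hpq hq
    have h1 : pvIdx s ↑p = s[p]'(by omega) := by
      rw [pvIdx, PySem.List.pyGetD_natCast, List.getD_eq_getElem s 0 (by omega)]
    have h2 : pvIdx s ↑q = s[q]'hq := by
      rw [pvIdx, PySem.List.pyGetD_natCast, List.getD_eq_getElem s 0 hq]
    rw [h1, h2]
    exact PySem.List.sorted_id_getElem_mono a hpq (hs ▸ hq)
  set k' : ℕ := k.toNat with hk'
  have hck : ((k' : ℕ) : Int) = k := by omega
  have hglen : k' - 1 < s.length := by omega
  -- left side: the two-pointer loop
  have hG : pvG s k % 1000000007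
      = ((0 : Int) + (pvCnt s (pvIdx s k) 0 k' : Int)) % 1000000007 := by
    have h2 : (↑(k' - 1) : Int) = k - 1 := by omega
    have hlm := loop_mod s k hmono (k' - 1) 0 (k' - 1) rfl (by omega) hglen 0
    have h3 : k' - 1 + 1 = k' := by omega
    rw [h3, Nat.cast_zero, h2] at hlm
    exact hlm
  -- right side: the brute-force sums
  have hS : pvS s k = (pvCnt s (pvIdx s k) 0 k' : Int) := by
    have hsum := sum_pyRange 1 k' (fun j =>
      ((PySem.List.pyRange 0 j 1).countP
        (fun i => decide (pvIdx s i + pvIdx s j > pvIdx s k)) : Int))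
    rw [Nat.cast_one, hck] at hsum
    unfold pvS
    rw [hsum]
    unfold pvCnt
    rw [Finset.sum_eq_sum_Ico_succ_bot (by omega : 0 < k')]
    simp only [Finset.Ico_self, Finset.filter_empty, Finset.card_empty, zero_add]
    rw [Nat.cast_sum]
    refine Finset.sum_congr rfl ?_
    intro j hj
    have hb := countP_pyRange 0 j (fun x => pvIdx s x + pvIdx s ↑j > pvIdx s k)
    rw [Nat.cast_zero] at hb
    rw [hb]
  rw [hG, hS, zero_add]

-- ===== VERDICT (by name: the statement is the Claim_ definition above) =====
theorem nTriang_spec : Claim_equal_nTriang := by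
  intro a _
  show nTriang a = nTriang_alt a
  rw [nTriang_eq_sum, nTriang_alt_eq_sum]
  set s : List Int := PySem.List.sorted a (fun x => x) false with hs
  have hn : PySem.List.len a = (a.length : Int) := by simp [PySem.List.len]
  rw [PySem.Int.mod_eq_emod_of_pos (by norm_num),
      PySem.Int.mod_eq_emod_of_pos (by norm_num)]
  by_cases h2 : 2 ≤ PySem.List.len a
  · rw [PySem.List.pyRange_one_append 1 2 (PySem.List.len a) (by norm_num) h2,
        List.map_append, List.sum_append]
    have hsing : PySem.List.pyRange 1 2 1 = [1] := by
      have : (2 : Int) = 1 + 1 := by norm_num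
      rw [this, PySem.List.pyRange_one_succ_right (by norm_num),
          PySem.List.pyRange_one_eq_nil (by norm_num)]
      rfl
    have hg1 : pvG s 1 = 0 := by
      rw [pvG, nTriangLoop]
      norm_num
    rw [hsing]
    simp only [List.map_cons, List.map_nil, List.sum_cons, List.sum_nil, hg1, zero_add]
    apply sum_mod_congr
    intro k hk
    rw [PySem.List.mem_pyRange_one] at hk
    exact g_mod_eq_s_mod a k hk.1 (by omega)
  · rw [PySem.List.pyRange_one_eq_nil (by omega : PySem.List.len a ≤ 1),
        PySem.List.pyRange_one_eq_nil (by omega : PySem.List.len a ≤ 2)]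
    simp
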